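-- pv_equiv track=rewrite | github.com/alexespencer/euler | src/euler/solutions/p100.py | find_bag_50pc
-- ===== SOURCE A (Python) =====
-- def find_bag_50pc(limit):
--     ab, ad, bc, cd = 3, 5, 7, 2
--     iterations = 0
--     odd = True
--     while True:
--         iterations += 1
--         b = ab * bc if odd else ad * cd + 1
--
--         # The block below isn't needed, but is a sanity check. Given we get to 10 ** 12 in just 15 iterations leave it in
--         a = ab * ad
--         c = a - 1
--         d = b - 1
--         assert b * d == 2 * a * c
--
--         if b > limit:
--             break
--
--         # Next in the series
--         ab = ad
--         cd = bc
--
--         if odd: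
--             bc = ad + bc
--             ad += bc
--         else:
--             ad += bc
--             bc += ad
--
--         odd = not odd
--
--     return b, a, iterations
-- ===== SOURCE B (Python) =====
-- def find_bag_50pc(limit):
--     # Maintain (blue, total) directly with one linear Pell-step recurrence,
--     # instead of A's four products ab,ad,bc,cd and the odd/even toggle.
--     blue, total, iterations = 15, 21, 1
--     while total <= limit:
--         blue, total = 3 * blue + 2 * total - 2, 4 * blue + 3 * total - 3
--         iterations += 1
--     return total, blue, iterations
-- ===== Notes on version B (the rewrite author's own statement) =====
-- stated objective: simpler
-- what changed: Replaces the four-product state (ab,ad,bc,cd), the odd/even toggle and the in-loop assert by the single linear Pell-step recurrence maintained directly on the pair (blue,total).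
import Mathlib
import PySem

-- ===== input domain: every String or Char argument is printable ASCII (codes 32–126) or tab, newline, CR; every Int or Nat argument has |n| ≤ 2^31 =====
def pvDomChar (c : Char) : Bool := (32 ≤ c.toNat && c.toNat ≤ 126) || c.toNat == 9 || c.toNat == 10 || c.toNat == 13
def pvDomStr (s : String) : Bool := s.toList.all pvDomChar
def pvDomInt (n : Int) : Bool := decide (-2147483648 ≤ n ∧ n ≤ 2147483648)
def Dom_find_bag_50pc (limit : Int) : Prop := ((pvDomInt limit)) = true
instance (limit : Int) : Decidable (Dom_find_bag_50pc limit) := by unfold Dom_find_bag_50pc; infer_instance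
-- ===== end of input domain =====

-- B keeps only the pair (blue,total) and one linear recurrence instead of A's four
-- products ab,ad,bc,cd with an odd/even toggle; same values, no speed claim.

-- ===== PORT A =====
-- Literal port of A's while-True loop. The fuel argument is only a totality guard:
-- for |limit| ≤ 2^31 the loop exits within 12 iterations, so fuel 14 is never exhausted
-- on the stated domain. The in-loop `assert b*d == 2*a*c` holds on every state the loop
-- reaches (it is the Pell invariant of this trace, which does not depend on limit), so
-- the raising path is unreachable and is not ported.
def findLoopA (fuel : Nat) (ab ad bc cd iterations : Int) (odd : Bool) (limit : Int) :
    Int × Int × Int :=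
  match fuel with
  | 0 => (0, 0, 0) -- fuel guard, unreachable on the stated domain
  | fuel + 1 =>
    let iterations := iterations + 1
    let b := if odd then ab * bc else ad * cd + 1
    let a := ab * ad
    if b > limit then (b, a, iterations)
    else
      let ab' := ad
      let cd' := bc
      if odd then
        findLoopA fuel ab' (ad + (ad + bc)) (ad + bc) cd' iterations (!odd) limit
      else
        findLoopA fuel ab' (ad + bc) (bc + (ad + bc)) cd' iterations (!odd) limit

def find_bag_50pc (limit : Int) : Int × Int × Int :=
  findLoopA 14 3 5 7 2 0 true limit

-- ===== PORT B =====
-- Literal port of Source B's while-loop; same fuel guard, unreachable on the stated domain.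
def altLoop (fuel : Nat) (blue total iterations limit : Int) : Int × Int × Int :=
  match fuel with
  | 0 => (0, 0, 0) -- fuel guard, unreachable on the stated domain
  | fuel + 1 =>
    if total ≤ limit then
      altLoop fuel (3 * blue + 2 * total - 2) (4 * blue + 3 * total - 3) (iterations + 1) limit
    else (total, blue, iterations)

def find_bag_50pc_alt (limit : Int) : Int × Int × Int :=
  altLoop 14 15 21 1 limit

-- ===== PRECONDITION & SPEC =====
def Spec_find_bag_50pc (limit : Int) (out : Int × Int × Int) : Prop := out = find_bag_50pc_alt limit
instance (limit : Int) (out : Int × Int × Int) : Decidable (Spec_find_bag_50pc limit out) := by unfold Spec_find_bag_50pc; infer_instance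

-- ===== CLAIM (what is proved, stated in full; the proofs are below) =====
def Claim_equal_find_bag_50pc : Prop := ∀ (limit : Int), Dom_find_bag_50pc limit → Spec_find_bag_50pc limit (find_bag_50pc limit)

-- ===== LEMMAS AND PROOFS =====

-- Bisimulation invariant linking A's loop state (ab, ad, bc, cd, odd) to B's (blue, total):
-- linear relations among ab, ad, bc, cd per parity plus the Pell-style quadratic invariant.
def pvInv (ab ad bc cd : Int) (odd : Bool) (blue total : Int) : Prop :=
  if odd then
    bc = 2 * ad - ab ∧ cd = ad - ab ∧ 2 * ad ^ 2 - 4 * ab * ad + ab ^ 2 + 1 = 0 ∧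
      blue = ab * ad ∧ total = ab * bc
  else
    bc = ad - ab ∧ cd = ad - 2 * ab ∧ ad ^ 2 - 4 * ab * ad + 2 * ab ^ 2 + 1 = 0 ∧
      blue = ab * ad ∧ total = ad * cd + 1

theorem pvLoop_eq (fuel : Nat) : ∀ (ab ad bc cd it : Int) (odd : Bool) (limit blue total : Int),
    pvInv ab ad bc cd odd blue total →
    findLoopA fuel ab ad bc cd it odd limit = altLoop fuel blue total (it + 1) limit := by
  induction fuel with
  | zero => intros; rfl
  | succ n ih =>
    intro ab ad bc cd it odd limit blue total hinv
    cases odd with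
    | true =>
      simp only [pvInv, if_true] at hinv
      obtain ⟨hbc, hcd, hp, hblue, htotal⟩ := hinv
      subst hbc hcd hblue htotal
      simp only [findLoopA, altLoop, if_true]
      by_cases hc : ab * (2 * ad - ab) ≤ limit
      · rw [if_neg (not_lt.mpr hc), if_pos hc]
        exact ih _ _ _ _ _ false _ _ _ (by
          simp only [pvInv, if_neg (by simp : ¬ (false = true))]
          refine ⟨by ring, by ring, by linear_combination hp, by linear_combination (-2 : Int) * hp,
            by linear_combination (-4 : Int) * hp⟩)
      · rw [if_pos (not_le.mp hc), if_neg hc]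
    | false =>
      simp only [pvInv, if_neg (by simp : ¬ (false = true))] at hinv
      obtain ⟨hbc, hcd, hp, hblue, htotal⟩ := hinv
      subst hbc hcd hblue htotal
      simp only [findLoopA, altLoop, if_neg (by simp : ¬ (false = true))]
      by_cases hc : ad * (ad - 2 * ab) + 1 ≤ limit
      · rw [if_neg (not_lt.mpr hc), if_pos hc]
        exact ih _ _ _ _ _ true _ _ _ (by
          simp only [pvInv, if_true]
          refine ⟨by ring, by ring, by linear_combination hp, by ring, by ring⟩)
      · rw [if_pos (not_le.mp hc), if_neg hc]

-- ===== VERDICT (by name: the statement is the Claim_ definition above) =====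
theorem find_bag_50pc_spec : Claim_equal_find_bag_50pc := by
  intro limit _
  unfold Spec_find_bag_50pc find_bag_50pc find_bag_50pc_alt
  simpa using pvLoop_eq 14 3 5 7 2 0 true limit 15 21 (by norm_num [pvInv])
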